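-- pv_equiv track=rewrite | github.com/ojashyadav101/lucy | src/lucy/slack/thread_manager.py | _is_question_word
-- ===== SOURCE A (Python) =====
-- def _is_question_word(text: str) -> bool:
--     """Check if text starts with question words."""
--     question_starters = [
--         "what", "how", "when", "where", "why", "who", "which",
--         "can", "could", "would", "will", "should", "is", "are",
--         "do", "does", "did", "has", "have", "was", "were",
--     ]
--     for starter in question_starters:
--         if text.startswith(starter + " "):
--             return True
--     return False
-- ===== SOURCE B (Python) =====
-- # A trie (prefix tree) of the starter words (each followed by a space) is built once;
-- # the input is matched by walking its characters through the trie, so a single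
-- # character-by-character scan replaces the 21 independent startswith prefix tests.
-- _QUESTION_STARTERS = [
--     "what", "how", "when", "where", "why", "who", "which",
--     "can", "could", "would", "will", "should", "is", "are",
--     "do", "does", "did", "has", "have", "was", "were",
-- ]
--
-- _TRIE = {}
-- for _w in _QUESTION_STARTERS:
--     _node = _TRIE
--     for _ch in _w + " ":
--         _node = _node.setdefault(_ch, {})
--     _node[""] = True  # "" marks an accepting node (cannot clash with a 1-char key)
--
--
-- def _is_question_word(text: str) -> bool:
--     """Check if text starts with question words."""
--     node = _TRIE
--     for ch in text:
--         if "" in node: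
--             return True
--         node = node.get(ch)
--         if node is None:
--             return False
--     return "" in node
-- ===== Notes on version B (the rewrite author's own statement) =====
-- stated objective: alternative
-- what changed: Replaces the loop of 21 independent startswith prefix scans by a trie (prefix tree) of the starter words built once, matched by a single character-by-character walk of the input.
import Mathlib
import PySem

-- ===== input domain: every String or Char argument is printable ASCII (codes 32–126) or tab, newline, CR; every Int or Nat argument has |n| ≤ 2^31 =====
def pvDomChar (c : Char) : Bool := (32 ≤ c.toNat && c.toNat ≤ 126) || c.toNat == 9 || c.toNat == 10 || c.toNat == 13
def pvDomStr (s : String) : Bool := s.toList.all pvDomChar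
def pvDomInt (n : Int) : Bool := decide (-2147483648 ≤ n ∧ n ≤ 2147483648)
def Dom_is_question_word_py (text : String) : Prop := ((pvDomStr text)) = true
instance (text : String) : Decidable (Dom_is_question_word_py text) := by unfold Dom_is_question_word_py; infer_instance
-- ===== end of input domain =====

-- B builds a trie of the starter words (each followed by a space) once and matches by a
-- single character-by-character walk, instead of A's 21 independent startswith prefix tests.

-- ===== PORT A =====
def pvStarters : List String :=
  ["what", "how", "when", "where", "why", "who", "which",
   "can", "could", "would", "will", "should", "is", "are",
   "do", "does", "did", "has", "have", "was", "were"]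

-- A's for-loop with early return, as structural recursion over the candidate list
def pvALoop (text : String) : List String → Bool
  | [] => false
  | s :: rest =>
      if PySem.Str.startswith text (s ++ " ") then true else pvALoop text rest

def is_question_word_py (text : String) : Bool :=
  pvALoop text pvStarters

-- ===== PORT B =====
-- trie node: accepting flag + children (mutual pair, no nested inductive)
mutual
inductive PvTrie where
  | mk : Bool → PvKids → PvTrie
  deriving Repr
inductive PvKids where
  | nil : PvKids
  | cons : Char → PvTrie → PvKids → PvKids
  deriving Repr
end

def pvEmpty : PvTrie := PvTrie.mk false PvKids.nil

-- node.get(ch): first child keyed by the char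
def pvFindKid : PvKids → Char → Option PvTrie
  | PvKids.nil, _ => none
  | PvKids.cons c t rest, d => if d = c then some t else pvFindKid rest d

-- replace the (first) child keyed by c, or append a new one
def pvSetKid : PvKids → Char → PvTrie → PvKids
  | PvKids.nil, c, t => PvKids.cons c t PvKids.nil
  | PvKids.cons c' t' rest, c, t =>
      if c = c' then PvKids.cons c' t rest else PvKids.cons c' t' (pvSetKid rest c t)

-- insert one pattern (the build loop's setdefault walk + terminal mark)
def pvInsert : PvTrie → List Char → PvTrie
  | PvTrie.mk _ k, [] => PvTrie.mk true k
  | PvTrie.mk b k, c :: cs =>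
      PvTrie.mk b (pvSetKid k c (pvInsert ((pvFindKid k c).getD pvEmpty) cs))

-- the module-level build loop over the starter words
def pvTrie : PvTrie :=
  pvStarters.foldl (fun t w => pvInsert t (w.toList ++ [' '])) pvEmpty

-- the walk loop of _is_question_word: accept on an accepting node, fail on a missing edge
def pvWalk : PvTrie → List Char → Bool
  | PvTrie.mk b _, [] => b
  | PvTrie.mk b k, c :: cs =>
      if b then true
      else
        match pvFindKid k c with
        | none => false
        | some t => pvWalk t cs

def is_question_word_py_alt (text : String) : Bool :=
  pvWalk pvTrie text.toList

-- ===== PRECONDITION & SPEC =====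
def Spec_is_question_word_py (text : String) (out : Bool) : Prop := out = is_question_word_py_alt text
instance (text : String) (out : Bool) : Decidable (Spec_is_question_word_py text out) := by unfold Spec_is_question_word_py; infer_instance

-- ===== CLAIM (what is proved, stated in full; the proofs are below) =====
def Claim_equal_is_question_word_py : Prop := ∀ (text : String), Dom_is_question_word_py text → Spec_is_question_word_py text (is_question_word_py text)

-- ===== LEMMAS AND PROOFS =====

theorem pvWalk_empty (cs : List Char) : pvWalk pvEmpty cs = false := by
  cases cs <;> simp [pvWalk, pvEmpty, pvFindKid]

def pvFindKid_setKid : ∀ (k : PvKids) (c : Char) (t : PvTrie) (d : Char),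
    pvFindKid (pvSetKid k c t) d = if d = c then some t else pvFindKid k d
  | PvKids.nil, c, t, d => by
      by_cases h : d = c <;> simp [pvSetKid, pvFindKid, h]
  | PvKids.cons c' t' rest, c, t, d => by
      by_cases hc : c = c'
      · subst hc
        by_cases h : d = c <;> simp [pvSetKid, pvFindKid, h]
      · by_cases h : d = c'
        · subst h
          have hd : ¬ d = c := fun hh => hc hh.symm
          simp [pvSetKid, pvFindKid, hc, hd]
        · simp [pvSetKid, pvFindKid, hc, h, pvFindKid_setKid rest c t d]

-- inserting a pattern w accepts exactly the previous inputs plus those with prefix w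
theorem pvWalk_insert (w : List Char) (t : PvTrie) (cs : List Char) :
    pvWalk (pvInsert t w) cs = (pvWalk t cs || decide (w <+: cs)) := by
  induction w generalizing t cs with
  | nil =>
      cases t with
      | mk b k =>
          cases cs with
          | nil => simp [pvInsert, pvWalk]
          | cons d ds => simp [pvInsert, pvWalk]
  | cons c w' ih =>
      cases t with
      | mk b k =>
          cases cs with
          | nil => simp [pvInsert, pvWalk]
          | cons d ds =>
              by_cases hb : b
              · simp [pvInsert, pvWalk, hb]
              · by_cases hd : d = c
                · subst hd
                  cases hf : pvFindKid k d with
                  | none =>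
                      simp [pvInsert, pvWalk, hb, pvFindKid_setKid, hf, ih,
                        pvWalk_empty, List.cons_prefix_cons]
                  | some u =>
                      simp [pvInsert, pvWalk, hb, pvFindKid_setKid, hf, ih,
                        List.cons_prefix_cons]
                · simp only [pvInsert, pvWalk, hb, pvFindKid_setKid, if_neg hd]
                  have hp : ¬ ((c :: w') <+: (d :: ds)) := by
                    simp [List.cons_prefix_cons]
                    exact fun h => absurd h.symm hd
                  simp [hp]

theorem pvWalk_foldl (ws : List String) (t : PvTrie) (cs : List Char) :
    pvWalk (ws.foldl (fun t w => pvInsert t (w.toList ++ [' '])) t) cs =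
      (pvWalk t cs || ws.any (fun w => decide ((w.toList ++ [' ']) <+: cs))) := by
  induction ws generalizing t with
  | nil => simp
  | cons w ws ih => simp [List.foldl_cons, ih, pvWalk_insert, Bool.or_assoc]

theorem pvALoop_eq_any (text : String) (l : List String) :
    pvALoop text l = l.any (fun s => PySem.Str.startswith text (s ++ " ")) := by
  induction l with
  | nil => rfl
  | cons s rest ih =>
      by_cases h : PySem.Str.startswith text (s ++ " ") = true <;>
        simp [pvALoop, ih]

theorem pv_startswith_eq_prefix (text : String) (s : String) :
    PySem.Str.startswith text (s ++ " ") = decide ((s.toList ++ [' ']) <+: text.toList) := by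
  have h : PySem.Str.startswith text (s ++ " ") =
      PySem.Chars.startswith text.toList (s.toList ++ [' ']) := by simp
  rw [h, Bool.eq_iff_iff]
  simp [PySem.Chars.startswith_iff]

-- ===== VERDICT (by name: the statement is the Claim_ definition above) =====
theorem is_question_word_py_spec : Claim_equal_is_question_word_py := by
  intro text _
  unfold Spec_is_question_word_py is_question_word_py is_question_word_py_alt pvTrie
  rw [pvALoop_eq_any, pvWalk_foldl, pvWalk_empty, Bool.false_or]
  simp only [pv_startswith_eq_prefix]
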